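-- pv_equiv track=rewrite | github.com/sandialabs/pyGSTi | pygsti/report/explore.py | selector_types_for_properties
-- ===== SOURCE A (Python) =====
-- def selector_types_for_properties(property_names):
--     prop_set = set(property_names)
--     dependencies = {  # include key if any of values (property template names) are present
--         '**model': set(['*model', '*model_title', '*model_dim', '*models', '*model_titles',
--                         '*gaugeopt_args', '*estimate_params', '*unmodeled_error', '*models_by_maxl']),
--         '**target_model': set(['*target_model']),
--         '**edesign': set(['*edesign', '*circuit_list', '*maxlengths', '*circuits_by_maxl']),
--         '**dataset': set(['*dataset']),
--         '**objfn_builder': set(['*objfn_builder'])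
--     }
--
--     selector_types = []
--     for sel_typ, prop_names in dependencies.items():
--         if prop_set.intersection(prop_names):
--             selector_types.append(sel_typ)
--     return selector_types
-- ===== SOURCE B (Python) =====
-- _DEPENDENCIES = [
--     ('**model', ['*model', '*model_title', '*model_dim', '*models', '*model_titles',
--                  '*gaugeopt_args', '*estimate_params', '*unmodeled_error', '*models_by_maxl']),
--     ('**target_model', ['*target_model']),
--     ('**edesign', ['*edesign', '*circuit_list', '*maxlengths', '*circuits_by_maxl']),
--     ('**dataset', ['*dataset']),
--     ('**objfn_builder', ['*objfn_builder']),
-- ]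
--
-- # reverse index: property template name -> selector key (built once)
-- _INDEX = {prop: sel for sel, props in _DEPENDENCIES for prop in props}
--
--
-- def selector_types_for_properties(property_names):
--     found = set()
--     for name in property_names:
--         sel = _INDEX.get(name)
--         if sel is not None:
--             found.add(sel)
--     return [sel for sel, _ in _DEPENDENCIES if sel in found]
-- ===== Notes on version B (the rewrite author's own statement) =====
-- stated objective: idiomatic
-- what changed: Replaces the per-selector set intersections with a reverse index built once (property name -> selector key): B makes one pass over the input collecting the selectors it hits, then emits them in the fixed canonical order.
import Mathlib
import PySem

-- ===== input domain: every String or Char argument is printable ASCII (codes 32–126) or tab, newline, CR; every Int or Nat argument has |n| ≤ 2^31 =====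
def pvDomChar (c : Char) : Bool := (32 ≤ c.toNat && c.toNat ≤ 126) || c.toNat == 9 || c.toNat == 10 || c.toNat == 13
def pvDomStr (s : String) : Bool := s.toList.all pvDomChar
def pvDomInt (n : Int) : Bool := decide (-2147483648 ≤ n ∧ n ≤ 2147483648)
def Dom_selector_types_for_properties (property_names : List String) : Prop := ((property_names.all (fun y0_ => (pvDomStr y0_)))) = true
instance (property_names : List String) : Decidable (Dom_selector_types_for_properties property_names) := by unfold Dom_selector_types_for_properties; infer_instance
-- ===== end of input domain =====

-- B replaces A's five set intersections by a reverse index built once; one pass over the input, then the fixed order filter.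

-- ===== PORT A =====
-- the dependencies dict of A, in insertion order; values are Python sets (literal, no duplicates)
def pvDepsA : List (String × PySem.Set String) :=
  [("**model", PySem.Set.ofList ["*model", "*model_title", "*model_dim", "*models", "*model_titles",
                                 "*gaugeopt_args", "*estimate_params", "*unmodeled_error", "*models_by_maxl"]),
   ("**target_model", PySem.Set.ofList ["*target_model"]),
   ("**edesign", PySem.Set.ofList ["*edesign", "*circuit_list", "*maxlengths", "*circuits_by_maxl"]),
   ("**dataset", PySem.Set.ofList ["*dataset"]),
   ("**objfn_builder", PySem.Set.ofList ["*objfn_builder"])]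

def selector_types_for_properties (property_names : List String) : List String :=
  let prop_set : PySem.Set String := PySem.Set.ofList property_names
  pvDepsA.foldl (fun acc kv =>
    if PySem.Set.inter prop_set kv.2 ≠ [] then acc ++ [kv.1] else acc) []

-- ===== PORT B =====
def pvDepsB : List (String × List String) :=
  [("**model", ["*model", "*model_title", "*model_dim", "*models", "*model_titles",
                "*gaugeopt_args", "*estimate_params", "*unmodeled_error", "*models_by_maxl"]),
   ("**target_model", ["*target_model"]),
   ("**edesign", ["*edesign", "*circuit_list", "*maxlengths", "*circuits_by_maxl"]),
   ("**dataset", ["*dataset"]),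
   ("**objfn_builder", ["*objfn_builder"])]

-- the reverse-index dict comprehension of Source B
def pvIndexB : PySem.Dict String String :=
  PySem.Dict.ofList (pvDepsB.flatMap (fun kv => kv.2.map (fun p => (p, kv.1))))

def selector_types_for_properties_alt (property_names : List String) : List String :=
  let found : PySem.Set String := property_names.foldl (fun s name =>
    match pvIndexB.get? name with
    | some sel => PySem.Set.add s sel
    | none => s) PySem.Set.empty
  (pvDepsB.map (fun kv => kv.1)).filter (fun sel => PySem.Set.contains found sel)

-- ===== PRECONDITION & SPEC =====
def Spec_selector_types_for_properties (property_names : List String) (out : List String) : Prop := out = selector_types_for_properties_alt property_names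
instance (property_names : List String) (out : List String) : Decidable (Spec_selector_types_for_properties property_names out) := by unfold Spec_selector_types_for_properties; infer_instance

-- ===== CLAIM (what is proved, stated in full; the proofs are below) =====
def Claim_equal_selector_types_for_properties : Prop := ∀ (property_names : List String), Dom_selector_types_for_properties property_names → Spec_selector_types_for_properties property_names (selector_types_for_properties property_names)

-- ===== LEMMAS AND PROOFS =====

-- A's intersection-nonempty test is "some input name lies in the dependency set"
lemma pv_inter_ne (names S : List String) :
    (PySem.Set.inter (PySem.Set.ofList names) S ≠ []) ↔ ∃ p ∈ names, p ∈ S := by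
  constructor
  · intro h
    obtain ⟨x, hx⟩ := List.exists_mem_of_ne_nil _ h
    rw [PySem.Set.mem_inter, PySem.Set.mem_ofList] at hx
    exact ⟨x, hx.1, hx.2⟩
  · rintro ⟨x, hx1, hx2⟩ hnil
    rw [List.eq_nil_iff_forall_not_mem] at hnil
    exact hnil x (by rw [PySem.Set.mem_inter, PySem.Set.mem_ofList]; exact ⟨hx1, hx2⟩)

-- B's found-set membership: k was added iff some input name maps to k in the index
lemma pv_mem_found (names : List String) (s : PySem.Set String) (k : String) :
    (k ∈ names.foldl (fun s name =>
        match pvIndexB.get? name with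
        | some sel => PySem.Set.add s sel
        | none => s) s) ↔ k ∈ s ∨ ∃ p ∈ names, pvIndexB.get? p = some k := by
  induction names generalizing s with
  | nil => simp
  | cons n ns ih =>
    simp only [List.foldl_cons, ih]
    cases h : pvIndexB.get? n with
    | none =>
      simp only [List.mem_cons]
      constructor
      · rintro (hs | hrest)
        · exact Or.inl hs
        · obtain ⟨p, hp, hpk⟩ := hrest
          exact Or.inr ⟨p, Or.inr hp, hpk⟩
      · rintro (hs | ⟨p, (rfl | hp), hpk⟩)
        · exact Or.inl hs
        · rw [h] at hpk; cases hpk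
        · exact Or.inr ⟨p, hp, hpk⟩
    | some sel =>
      simp only [PySem.Set.mem_add, List.mem_cons]
      constructor
      · rintro ((hs | rfl) | hrest)
        · exact Or.inl hs
        · exact Or.inr ⟨n, Or.inl rfl, h⟩
        · obtain ⟨p, hp, hpk⟩ := hrest; exact Or.inr ⟨p, Or.inr hp, hpk⟩
      · rintro (hs | ⟨p, (rfl | hp), hpk⟩)
        · exact Or.inl (Or.inl hs)
        · rw [h] at hpk; cases hpk; exact Or.inl (Or.inr rfl)
        · exact Or.inr ⟨p, hp, hpk⟩

-- first-match lookup in a literal dict with nodup keys is association-list membership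
lemma pv_get_mem (l : List (String × String)) (hnd : (l.map Prod.fst).Nodup) (p k : String) :
    ((PySem.Dict.mk l).get? p = some k) ↔ (p, k) ∈ l := by
  induction l with
  | nil => simp [PySem.Dict.get?]
  | cons hd tl ih =>
    obtain ⟨a, b⟩ := hd
    simp only [List.map_cons, List.nodup_cons] at hnd
    rw [PySem.Dict.get?_mk_cons]
    by_cases hap : a = p
    · subst hap
      simp only [beq_self_eq_true, if_true, List.mem_cons, Option.some.injEq]
      constructor
      · rintro rfl; exact Or.inl rfl
      · rintro (h | h)
        · exact (Prod.mk.injEq _ _ _ _ ▸ h).2.symm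
        · exact absurd (List.mem_map.mpr ⟨(a, k), h, rfl⟩) hnd.1
    · simp only [beq_iff_eq, hap, if_false, List.mem_cons, ih hnd.2]
      constructor
      · exact Or.inr
      · rintro (h | h)
        · exact absurd (congrArg Prod.fst h).symm hap
        · exact h

-- the flattened reverse index, as a literal pair list
def pvFlat : List (String × String) :=
  [("*model", "**model"), ("*model_title", "**model"), ("*model_dim", "**model"),
   ("*models", "**model"), ("*model_titles", "**model"), ("*gaugeopt_args", "**model"),
   ("*estimate_params", "**model"), ("*unmodeled_error", "**model"), ("*models_by_maxl", "**model"),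
   ("*target_model", "**target_model"),
   ("*edesign", "**edesign"), ("*circuit_list", "**edesign"), ("*maxlengths", "**edesign"),
   ("*circuits_by_maxl", "**edesign"),
   ("*dataset", "**dataset"),
   ("*objfn_builder", "**objfn_builder")]

lemma pv_indexB_eval : pvIndexB = PySem.Dict.mk pvFlat := by decide

lemma pv_get_iff (p k : String) : (pvIndexB.get? p = some k) ↔ (p, k) ∈ pvFlat := by
  rw [pv_indexB_eval]
  exact pv_get_mem pvFlat (by decide) p k

-- the loop state of B's found set, named for the proofs
def pvFound (names : List String) : PySem.Set String :=
  names.foldl (fun s name =>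
    match pvIndexB.get? name with
    | some sel => PySem.Set.add s sel
    | none => s) PySem.Set.empty

lemma pv_found_iff (names : List String) (k : String) :
    (k ∈ pvFound names) ↔ ∃ p ∈ names, (p, k) ∈ pvFlat := by
  rw [pvFound, pv_mem_found]
  simp only [PySem.Set.empty, List.not_mem_nil, false_or, pv_get_iff]

-- the five condition bridges, one per selector key
lemma pv_c1 (names : List String) :
    (PySem.Set.inter (PySem.Set.ofList names) (PySem.Set.ofList ["*model", "*model_title", "*model_dim", "*models", "*model_titles", "*gaugeopt_args", "*estimate_params", "*unmodeled_error", "*models_by_maxl"]) ≠ []) ↔ "**model" ∈ pvFound names := by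
  rw [pv_inter_ne, pv_found_iff]
  constructor <;> rintro ⟨p, hp, hin⟩ <;> refine ⟨p, hp, ?_⟩ <;>
    simp only [pvFlat, PySem.Set.mem_ofList, List.mem_cons, List.not_mem_nil, or_false,
      Prod.mk.injEq] at hin ⊢ <;> rcases hin with h|h|h|h|h|h|h|h|h|h|h|h|h|h|h|h <;> simp_all
lemma pv_c2 (names : List String) :
    (PySem.Set.inter (PySem.Set.ofList names) (PySem.Set.ofList ["*target_model"]) ≠ []) ↔ "**target_model" ∈ pvFound names := by
  rw [pv_inter_ne, pv_found_iff]
  constructor <;> rintro ⟨p, hp, hin⟩ <;> refine ⟨p, hp, ?_⟩ <;>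
    simp only [pvFlat, PySem.Set.mem_ofList, List.mem_cons, List.not_mem_nil, or_false,
      Prod.mk.injEq] at hin ⊢ <;> rcases hin with h|h|h|h|h|h|h|h|h|h|h|h|h|h|h|h <;> simp_all
lemma pv_c3 (names : List String) :
    (PySem.Set.inter (PySem.Set.ofList names) (PySem.Set.ofList ["*edesign", "*circuit_list", "*maxlengths", "*circuits_by_maxl"]) ≠ []) ↔ "**edesign" ∈ pvFound names := by
  rw [pv_inter_ne, pv_found_iff]
  constructor <;> rintro ⟨p, hp, hin⟩ <;> refine ⟨p, hp, ?_⟩ <;>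
    simp only [pvFlat, PySem.Set.mem_ofList, List.mem_cons, List.not_mem_nil, or_false,
      Prod.mk.injEq] at hin ⊢ <;> rcases hin with h|h|h|h|h|h|h|h|h|h|h|h|h|h|h|h <;> simp_all
lemma pv_c4 (names : List String) :
    (PySem.Set.inter (PySem.Set.ofList names) (PySem.Set.ofList ["*dataset"]) ≠ []) ↔ "**dataset" ∈ pvFound names := by
  rw [pv_inter_ne, pv_found_iff]
  constructor <;> rintro ⟨p, hp, hin⟩ <;> refine ⟨p, hp, ?_⟩ <;>
    simp only [pvFlat, PySem.Set.mem_ofList, List.mem_cons, List.not_mem_nil, or_false,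
      Prod.mk.injEq] at hin ⊢ <;> rcases hin with h|h|h|h|h|h|h|h|h|h|h|h|h|h|h|h <;> simp_all
lemma pv_c5 (names : List String) :
    (PySem.Set.inter (PySem.Set.ofList names) (PySem.Set.ofList ["*objfn_builder"]) ≠ []) ↔ "**objfn_builder" ∈ pvFound names := by
  rw [pv_inter_ne, pv_found_iff]
  constructor <;> rintro ⟨p, hp, hin⟩ <;> refine ⟨p, hp, ?_⟩ <;>
    simp only [pvFlat, PySem.Set.mem_ofList, List.mem_cons, List.not_mem_nil, or_false,
      Prod.mk.injEq] at hin ⊢ <;> rcases hin with h|h|h|h|h|h|h|h|h|h|h|h|h|h|h|h <;> simp_all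

theorem pv_main (names : List String) :
    selector_types_for_properties names = selector_types_for_properties_alt names := by
  show _ = (pvDepsB.map (fun kv => kv.1)).filter (fun sel => PySem.Set.contains (pvFound names) sel)
  simp only [selector_types_for_properties, pvDepsA, pvDepsB, List.foldl, List.map, List.filter,
    PySem.Set.contains_eq_listContains, List.contains_eq_mem]
  by_cases h1 : "**model" ∈ pvFound names <;>
  by_cases h2 : "**target_model" ∈ pvFound names <;>
  by_cases h3 : "**edesign" ∈ pvFound names <;>
  by_cases h4 : "**dataset" ∈ pvFound names <;>
  by_cases h5 : "**objfn_builder" ∈ pvFound names <;>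
    simp [pv_c1, pv_c2, pv_c3, pv_c4, pv_c5, h1, h2, h3, h4, h5]

-- ===== VERDICT (by name: the statement is the Claim_ definition above) =====
theorem selector_types_for_properties_spec : Claim_equal_selector_types_for_properties := by
  intro names _
  unfold Spec_selector_types_for_properties
  exact pv_main names
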